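-- pv_equiv track=rewrite | github.com/octaviustheking/competitive-programming | python/codeforces/C. Production of Snowmen/main.py | good_shift
-- ===== SOURCE A (Python) =====
-- def good_shift(x, y):
--     x_length = len(x)
--     good = [True] * x_length
--     for j in range(x_length):
--         ok = True
--         for k in range(x_length):
--             if x[k] >=y[(k + j) % x_length]:
--                 ok = False
--                 break
--         good[j] = ok
--     return good
-- ===== SOURCE B (Python) =====
-- def good_shift(x, y):
--     n = len(x)
--     good = [True] * n
--     for k in range(n):
--         for p in range(n):
--             if x[k] >= y[p]:
--                 good[(p - k) % n] = False
--     return good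
-- ===== Notes on version B (the rewrite author's own statement) =====
-- stated objective: alternative
-- what changed: Instead of testing each shift j with an inner scan that breaks at the first violation, B scans all (k,p) index pairs once and marks the unique shift j=(p-k)%n that each violating pair x[k]>=y[p] invalidates.
import Mathlib
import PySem

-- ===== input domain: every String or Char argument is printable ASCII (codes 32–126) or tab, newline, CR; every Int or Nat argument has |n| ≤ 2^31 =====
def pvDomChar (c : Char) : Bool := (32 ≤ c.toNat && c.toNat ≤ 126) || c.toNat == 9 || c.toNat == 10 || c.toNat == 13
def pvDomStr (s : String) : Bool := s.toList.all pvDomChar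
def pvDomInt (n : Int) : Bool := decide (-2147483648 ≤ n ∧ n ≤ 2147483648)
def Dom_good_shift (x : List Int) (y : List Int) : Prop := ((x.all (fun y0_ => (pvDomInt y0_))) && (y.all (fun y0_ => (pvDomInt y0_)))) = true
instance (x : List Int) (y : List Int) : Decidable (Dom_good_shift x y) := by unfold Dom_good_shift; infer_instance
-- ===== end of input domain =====

-- B marks bad shifts from violating index pairs (j = (p-k) % n) in one pair-scan,
-- instead of A's per-shift inner scan with early break; same O(n^2) cost, different decomposition.


-- ===== PORT A =====
-- inner loop 'for k in …: if x[k] >= y[(k+j) % n]: ok = False; break' (pyGetD is exact here: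
-- under Pre_ every index is in range)
def goodShiftOkA (x : List Int) (y : List Int) (n : Int) (j : Int) : List Int → Bool
  | [] => true
  | k :: ks =>
    if PySem.List.pyGetD x k 0 ≥ PySem.List.pyGetD y (PySem.Int.mod (k + j) n) 0 then false
    else goodShiftOkA x y n j ks

def good_shift (x : List Int) (y : List Int) : List Bool :=
  let n : Int := x.length
  (PySem.List.pyRange 0 n 1).foldl
    (fun good j => PySem.List.pySetD good j (goodShiftOkA x y n j (PySem.List.pyRange 0 n 1)))
    (List.replicate x.length true)

-- ===== PORT B =====
def good_shift_alt (x : List Int) (y : List Int) : List Bool :=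
  let n : Int := x.length
  (PySem.List.pyRange 0 n 1).foldl
    (fun good k =>
      (PySem.List.pyRange 0 n 1).foldl
        (fun good p =>
          if PySem.List.pyGetD x k 0 ≥ PySem.List.pyGetD y p 0 then
            PySem.List.pySetD good (PySem.Int.mod (p - k) n) false
          else good)
        good)
    (List.replicate x.length true)

-- ===== PRECONDITION & SPEC =====
-- Pre_ excludes exactly the inputs on which A raises IndexError: whenever len(y) < len(x)
-- (and x is nonempty) the shift j = len(y) reads y[j] at its first inner step and raises.
def Pre_good_shift (x : List Int) (y : List Int) : Prop := x.length ≤ y.length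
instance (x : List Int) (y : List Int) : Decidable (Pre_good_shift x y) := by unfold Pre_good_shift; infer_instance
def pvWitness_good_shift : List Int × List Int := ([1, 5, 2], [3, 6, 4])

def Spec_good_shift (x : List Int) (y : List Int) (out : List Bool) : Prop := out = good_shift_alt x y
instance (x : List Int) (y : List Int) (out : List Bool) : Decidable (Spec_good_shift x y out) := by unfold Spec_good_shift; infer_instance

-- ===== CLAIM (what is proved, stated in full; the proofs are below) =====
def Claim_equal_good_shift : Prop := ∀ (x : List Int) (y : List Int), Dom_good_shift x y → Pre_good_shift x y → Spec_good_shift x y (good_shift x y)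

-- ===== LEMMAS AND PROOFS =====

-- Folding "good[i] = g i" over a list of non-negative Int indices, pointwise.
theorem foldl_setD_getElem? (g : Int → Bool) (js : List Int) (init : List Bool)
    (hpos : ∀ i ∈ js, 0 ≤ i) (j : Nat) :
    (js.foldl (fun good i => PySem.List.pySetD good i (g i)) init)[j]? =
      if (j : Int) ∈ js then (if j < init.length then some (g j) else none) else init[j]? := by
  induction js generalizing init with
  | nil => simp
  | cons i js ih =>
    have hi : 0 ≤ i := hpos i (List.mem_cons_self ..)
    obtain ⟨m, rfl⟩ := Int.eq_ofNat_of_zero_le hi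
    rw [List.foldl_cons, PySem.List.pySetD_natCast,
      ih _ (fun a ha => hpos a (List.mem_cons_of_mem _ ha))]
    by_cases hmem : (j : Int) ∈ js
    · simp [List.length_set, hmem]
    · by_cases hij : j = m
      · subst hij
        rw [if_neg hmem, if_pos (List.mem_cons_self ..)]
        by_cases hlt : j < init.length
        · rw [if_pos hlt]
          simp [hlt]
        · rw [if_neg hlt]
          exact List.getElem?_eq_none (by simp; omega)
      · have hnm : (j : Int) ∉ ((m : Nat) : Int) :: js := by
          simp [hmem, hij]
        rw [if_neg hmem, List.getElem?_set_ne (show m ≠ j by omega), if_neg hnm]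

-- The conditional inner loop of B is a plain set-false fold over the hit indices.
theorem foldl_if_set_eq_filter (c : Int → Prop) [DecidablePred c] (idx : Int → Int)
    (ps : List Int) (init : List Bool) :
    (ps.foldl (fun good p => if c p then PySem.List.pySetD good (idx p) false else good) init) =
      (((ps.filter fun p => decide (c p)).map idx).foldl
        (fun good i => PySem.List.pySetD good i false) init) := by
  induction ps generalizing init with
  | nil => simp
  | cons p ps ih =>
    by_cases hc : c p <;> simp [hc, ih]

-- The nested loop of B is a single set-false fold over all hit indices.
theorem foldl_nested_eq_flat (c : Int → Int → Prop) [∀ k p, Decidable (c k p)]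
    (idx : Int → Int → Int) (ks ps : List Int) (init : List Bool) :
    (ks.foldl (fun good k =>
        ps.foldl (fun good p => if c k p then PySem.List.pySetD good (idx k p) false else good)
          good) init) =
      ((ks.flatMap fun k => (ps.filter fun p => decide (c k p)).map (idx k)).foldl
        (fun good i => PySem.List.pySetD good i false) init) := by
  induction ks generalizing init with
  | nil => simp
  | cons k ks ih =>
    rw [List.foldl_cons, List.flatMap_cons, List.foldl_append, ih,
      foldl_if_set_eq_filter]

-- A's early-break inner loop is List.all of the negated condition.
theorem goodShiftOkA_eq_all (x y : List Int) (n j : Int) (ks : List Int) :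
    goodShiftOkA x y n j ks =
      ks.all (fun k =>
        !(decide (PySem.List.pyGetD x k 0 ≥
          PySem.List.pyGetD y (PySem.Int.mod (k + j) n) 0))) := by
  induction ks with
  | nil => rfl
  | cons k ks ih =>
    by_cases h : PySem.List.pyGetD x k 0 ≥
        PySem.List.pyGetD y (PySem.Int.mod (k + j) n) 0 <;>
      simp [goodShiftOkA, h, ih]

theorem mod_shift_right (n k j : Int) (h0 : 0 ≤ j) (h1 : j < n) :
    PySem.Int.mod (PySem.Int.mod (k + j) n - k) n = j := by
  have hn : 0 < n := lt_of_le_of_lt h0 h1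
  rw [PySem.Int.mod_eq_emod_of_pos hn, PySem.Int.mod_eq_emod_of_pos hn]
  calc ((k + j) % n - k) % n = ((k + j) - k) % n := by
        rw [Int.sub_emod, Int.emod_emod_of_dvd _ dvd_rfl, ← Int.sub_emod]
    _ = j % n := by ring_nf
    _ = j := Int.emod_eq_of_lt h0 h1

theorem mod_shift_left (n k p : Int) (h0 : 0 ≤ p) (h1 : p < n) :
    PySem.Int.mod (k + PySem.Int.mod (p - k) n) n = p := by
  have hn : 0 < n := lt_of_le_of_lt h0 h1
  rw [PySem.Int.mod_eq_emod_of_pos hn, PySem.Int.mod_eq_emod_of_pos hn]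
  calc (k + (p - k) % n) % n = (k + (p - k)) % n := by
        rw [Int.add_emod, Int.emod_emod_of_dvd _ dvd_rfl, ← Int.add_emod]
    _ = p % n := by ring_nf
    _ = p := Int.emod_eq_of_lt h0 h1

theorem PySem_mod_nonneg (a n : Int) (hn : 0 < n) : 0 ≤ PySem.Int.mod a n := by
  rw [PySem.Int.mod_eq_emod_of_pos hn]; exact Int.emod_nonneg a (by omega)

theorem PySem_mod_lt (a n : Int) (hn : 0 < n) : PySem.Int.mod a n < n := by
  rw [PySem.Int.mod_eq_emod_of_pos hn]; exact Int.emod_lt_of_pos a hn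

-- ===== VERDICT (by name: the statement is the Claim_ definition above) =====
theorem good_shift_spec : Claim_equal_good_shift := by
  intro x y _hDom _hPre
  simp only [Spec_good_shift, good_shift, good_shift_alt]
  set n : Int := (x.length : Int) with hn
  set rng := PySem.List.pyRange 0 n 1 with hrng
  have hmem : ∀ i : Int, i ∈ rng ↔ 0 ≤ i ∧ i < n := by
    intro i; rw [hrng, PySem.List.mem_pyRange_one]
  have hpos : ∀ i ∈ rng, 0 ≤ i := fun i hi => ((hmem i).1 hi).1
  -- the condition and the hit-shift of a pair (k, p)
    -- (names for readability)
  have hposflat : ∀ i ∈ (rng.flatMap fun k =>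
      (rng.filter fun p =>
        decide (PySem.List.pyGetD x k 0 ≥ PySem.List.pyGetD y p 0)).map
          fun p => PySem.Int.mod (p - k) n), 0 ≤ i := by
    intro i hi
    rw [List.mem_flatMap] at hi
    obtain ⟨k, hk, hi⟩ := hi
    rw [List.mem_map] at hi
    obtain ⟨p, _, rfl⟩ := hi
    exact PySem_mod_nonneg _ _ (lt_of_le_of_lt ((hmem k).1 hk).1 ((hmem k).1 hk).2)
  apply List.ext_getElem?
  intro j
  rw [foldl_setD_getElem? _ rng _ hpos j,
    foldl_nested_eq_flat
      (fun k p => PySem.List.pyGetD x k 0 ≥ PySem.List.pyGetD y p 0)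
      (fun k p => PySem.Int.mod (p - k) n) rng rng,
    foldl_setD_getElem? (fun _ => false) _ _ hposflat j]
  by_cases hj : j < x.length
  · have hjr : (j : Int) ∈ rng := (hmem _).2 ⟨by positivity, by omega⟩
    by_cases hhit :
        ((j : Int)) ∈ (rng.flatMap fun k =>
          (rng.filter fun p =>
            decide (PySem.List.pyGetD x k 0 ≥ PySem.List.pyGetD y p 0)).map
              fun p => PySem.Int.mod (p - k) n)
    · rw [if_pos hjr, if_pos hhit, List.length_replicate, if_pos hj, if_pos hj]
      -- some violating pair hits this shift, so A's inner loop also finds a violation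
      rw [List.mem_flatMap] at hhit
      obtain ⟨k, hk, hj2⟩ := hhit
      rw [List.mem_map] at hj2
      obtain ⟨p, hp, hpj⟩ := hj2
      rw [List.mem_filter] at hp
      obtain ⟨hpmem, hcond⟩ := hp
      have hp0 := ((hmem p).1 hpmem).1
      have hp1 := ((hmem p).1 hpmem).2
      have hback : PySem.Int.mod (k + (j : Int)) n = p := by
        rw [← hpj]; exact mod_shift_left n k p hp0 hp1
      rw [goodShiftOkA_eq_all]
      congr 1
      rw [List.all_eq_false]
      refine ⟨k, hk, ?_⟩
      rw [hback]
      simp only [decide_eq_true_eq] at hcond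
      simp [hcond]
    · rw [if_pos hjr, if_neg hhit, List.length_replicate, if_pos hj,
        List.getElem?_replicate, if_pos hj]
      -- no pair hits this shift: every k satisfies the negated condition
      rw [goodShiftOkA_eq_all]
      congr 1
      rw [List.all_eq_true]
      intro k hk
      simp only [Bool.not_eq_eq_eq_not, Bool.not_true, decide_eq_false_iff_not]
      intro hcond
      apply hhit
      rw [List.mem_flatMap]
      refine ⟨k, hk, ?_⟩
      rw [List.mem_map]
      have hk0 := ((hmem k).1 hk).1
      have hkn : 0 < n := lt_of_le_of_lt hk0 ((hmem k).1 hk).2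
      refine ⟨PySem.Int.mod (k + (j : Int)) n, ?_, ?_⟩
      · rw [List.mem_filter]
        exact ⟨(hmem _).2 ⟨PySem_mod_nonneg _ _ hkn, PySem_mod_lt _ _ hkn⟩, by simpa using hcond⟩
      · exact mod_shift_right n k (j : Int) (by positivity) (by omega)
  · have hjr : (j : Int) ∉ rng := by
      intro h; exact hj (by have := ((hmem _).1 h).2; omega)
    rw [if_neg hjr]
    split <;> simp [hj]
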